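-- pv_equiv track=rewrite | github.com/Jihyeok11/Algorithm | Python/코테/2021 농심NDS 인턴/1.py | solution
-- ===== SOURCE A (Python) =====
-- def solution(s):
--     answer = 0
--     baZ = True
--     baA = True
--     for word in s:
--         if word == "z" and baZ:
--             baZ = False
--         elif word == "a" and not baZ:
--             answer += 1
--             baZ = True
--         if word == "a" and baA:
--             baA = False
--         elif word == "z" and not baA:
--             answer+= 1
--             baA = True
--     return answer
-- ===== SOURCE B (Python) =====
-- def solution(s):
--     # Count maximal runs of the {a,z} subsequence; answer = runs - 1 (floored at 0).
--     runs = 0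
--     last = None
--     for c in s:
--         if c in "az" and c != last:
--             runs += 1
--             last = c
--     return max(runs - 1, 0)
-- ===== Notes on version B (the rewrite author's own statement) =====
-- stated objective: simpler
-- what changed: Replaces A's two interleaved greedy automata (one for z..a pairs, one for a..z pairs) with a single run counter over the {a,z} subsequence, returning max(runs-1, 0).
import Mathlib
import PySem

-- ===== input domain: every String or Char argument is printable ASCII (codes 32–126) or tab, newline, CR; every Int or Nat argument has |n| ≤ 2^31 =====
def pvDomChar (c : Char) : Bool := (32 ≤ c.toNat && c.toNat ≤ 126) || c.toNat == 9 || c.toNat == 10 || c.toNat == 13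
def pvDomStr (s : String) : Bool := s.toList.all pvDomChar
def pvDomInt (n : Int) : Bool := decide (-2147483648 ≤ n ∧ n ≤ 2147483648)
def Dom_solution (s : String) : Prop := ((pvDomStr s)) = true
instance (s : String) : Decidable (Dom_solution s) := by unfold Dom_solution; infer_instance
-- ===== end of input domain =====

-- B replaces A's two interleaved greedy automata with a single run counter over the
-- {a,z} subsequence (answer = max(runs-1,0)); objective: simpler.

-- ===== PORT A =====
-- one loop step of A: state (answer, baZ, baA)
def solution_stepA (st : Int × Bool × Bool) (c : Char) : Int × Bool × Bool :=
  let ans := st.1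
  let baZ := st.2.1
  let baA := st.2.2
  let p1 : Int × Bool :=
    if c = 'z' ∧ baZ then (ans, false)
    else if c = 'a' ∧ ¬ (baZ = true) then (ans + 1, true)
    else (ans, baZ)
  let p2 : Int × Bool :=
    if c = 'a' ∧ baA then (p1.1, false)
    else if c = 'z' ∧ ¬ (baA = true) then (p1.1 + 1, true)
    else (p1.1, baA)
  (p2.1, p1.2, p2.2)

def solution (s : String) : Int :=
  (s.toList.foldl solution_stepA (0, true, true)).1

-- ===== PORT B =====
-- one loop step of B: state (runs, last)
def solution_stepB (st : Int × Option Char) (c : Char) : Int × Option Char :=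
  if (c = 'a' ∨ c = 'z') ∧ some c ≠ st.2 then (st.1 + 1, some c) else st

def solution_alt (s : String) : Int :=
  max ((s.toList.foldl solution_stepB (0, none)).1 - 1) 0

-- ===== PRECONDITION & SPEC =====
def Spec_solution (s : String) (out : Int) : Prop := out = solution_alt s
instance (s : String) (out : Int) : Decidable (Spec_solution s out) := by unfold Spec_solution; infer_instance

-- ===== CLAIM (what is proved, stated in full; the proofs are below) =====
def Claim_equal_solution : Prop := ∀ (s : String), Dom_solution s → Spec_solution s (solution s)

-- ===== LEMMAS AND PROOFS =====

-- Invariant tying A's state to B's state.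
def solution_good (stA : Int × Bool × Bool) (stB : Int × Option Char) : Prop :=
  stA.1 = max (stB.1 - 1) 0 ∧
  ((stB.2 = none ∧ stA.2.1 = true ∧ stA.2.2 = true ∧ stB.1 = 0) ∨
   (stB.2 = some 'a' ∧ stA.2.1 = true ∧ stA.2.2 = false ∧ 1 ≤ stB.1) ∨
   (stB.2 = some 'z' ∧ stA.2.1 = false ∧ stA.2.2 = true ∧ 1 ≤ stB.1))

theorem solution_good_step (stA : Int × Bool × Bool) (stB : Int × Option Char)
    (h : solution_good stA stB) (c : Char) :
    solution_good (solution_stepA stA c) (solution_stepB stB c) := by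
  obtain ⟨ansA, baZ, baA⟩ := stA
  obtain ⟨runs, last⟩ := stB
  obtain ⟨hans, hcase⟩ := h
  by_cases ha : c = 'a' <;> by_cases hz : c = 'z'
  · simp [ha] at hz
  all_goals
    rcases hcase with ⟨h1, h2, h3, h4⟩ | ⟨h1, h2, h3, h4⟩ | ⟨h1, h2, h3, h4⟩ <;>
      subst_vars <;>
      simp_all [solution_good, solution_stepA, solution_stepB] <;>
      omega

theorem solution_good_foldl (l : List Char) (stA : Int × Bool × Bool) (stB : Int × Option Char)
    (h : solution_good stA stB) :
    solution_good (l.foldl solution_stepA stA) (l.foldl solution_stepB stB) := by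
  induction l generalizing stA stB with
  | nil => exact h
  | cons c l ih => exact ih _ _ (solution_good_step _ _ h c)

-- ===== VERDICT (by name: the statement is the Claim_ definition above) =====
theorem solution_spec : Claim_equal_solution := by
  intro s _
  unfold Spec_solution solution solution_alt
  have h := solution_good_foldl s.toList (0, true, true) (0, none)
    (by simp [solution_good])
  exact h.1
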